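-- pv_equiv track=rewrite | github.com/Lightthouse/ozon-tasks | main_event_tasks/e.py | filter_word
-- ===== SOURCE A (Python) =====
-- def filter_word(word: str):
--     i = 0
--     for char in word:
--         if i + 1 < len(word) and word[i + 1] == char:
--
--             word = word[:i] + word[(i + 1):]
--         else:
--             i += 1
--     return word
-- ===== SOURCE B (Python) =====
-- def filter_word(word: str):
--     # One pass: keep a character only when it differs from the last kept one.
--     out = []
--     for c in word:
--         if not out or out[-1] != c:
--             out.append(c)
--     return ''.join(out)
-- ===== Notes on version B (the rewrite author's own statement) =====
-- stated objective: faster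
-- what changed: Replaces the in-place pointer/delete loop that rebuilds the string by slicing on every duplicate with a single accumulator pass that keeps a char only when it differs from the last kept one.
import Mathlib
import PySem

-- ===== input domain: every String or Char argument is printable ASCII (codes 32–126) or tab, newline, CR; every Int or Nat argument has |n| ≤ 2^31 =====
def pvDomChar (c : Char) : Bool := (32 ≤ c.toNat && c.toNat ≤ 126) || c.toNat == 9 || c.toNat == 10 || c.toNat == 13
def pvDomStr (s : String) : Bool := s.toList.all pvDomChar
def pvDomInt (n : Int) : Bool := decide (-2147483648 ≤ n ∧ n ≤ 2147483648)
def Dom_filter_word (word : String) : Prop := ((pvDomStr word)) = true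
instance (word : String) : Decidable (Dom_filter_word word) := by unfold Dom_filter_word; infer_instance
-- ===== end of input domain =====

-- B is the same exact collapsing of adjacent duplicate characters done in one accumulator pass
-- instead of A's pointer-and-delete loop that rebuilds the string by slicing on every duplicate.

-- ===== PORT A =====
-- one iteration of A's 'for char in word' body over the mutating state (word, i)
def pvStepA (st : List Char × Int) (char : Char) : List Char × Int :=
  let w := st.1
  let i := st.2
  if i + 1 < (w.length : Int) ∧ PySem.List.pyGet? w (i + 1) = some char then
    (PySem.List.slice w none (some i) ++ PySem.List.slice w (some (i + 1)) none, i)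
  else
    (w, i + 1)

def filter_word (word : String) : String :=
  -- 'for char in word' iterates over the ORIGINAL string even though 'word' is reassigned
  String.ofList (word.toList.foldl pvStepA (word.toList, 0)).1

-- ===== PORT B =====
-- one iteration of B's loop: append c unless it equals the last kept character
def pvStepB (out : List Char) (c : Char) : List Char :=
  if out = [] ∨ out.getLast? ≠ some c then out ++ [c] else out

def filter_word_alt (word : String) : String :=
  String.ofList (word.toList.foldl pvStepB [])

-- ===== PRECONDITION & SPEC =====
def Spec_filter_word (word : String) (out : String) : Prop := out = filter_word_alt word
instance (word : String) (out : String) : Decidable (Spec_filter_word word out) := by unfold Spec_filter_word; infer_instance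

-- ===== CLAIM (what is proved, stated in full; the proofs are below) =====
def Claim_equal_filter_word : Prop := ∀ (word : String), Dom_filter_word word → Spec_filter_word word (filter_word word)

-- ===== LEMMAS AND PROOFS =====

-- Main loop invariant, by induction on the remaining (original) characters `suf`,
-- where `d` is B's accumulator over the characters already consumed:
-- either (left) w = d ++ suf, i = |d| and the next char does not equal d's last,
-- or (right) the next char c equals d's last, w = d.dropLast ++ suf and i = |d| - 1.
theorem pv_inv : ∀ (suf d w : List Char) (i : Int),
    ((w = d ++ suf ∧ i = (d.length : Int) ∧ ∀ c t, suf = c :: t → d.getLast? ≠ some c)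
      ∨ (∃ c t, suf = c :: t ∧ d.getLast? = some c ∧ w = d.dropLast ++ suf ∧ i = (d.length : Int) - 1)) →
    (suf.foldl pvStepA (w, i)).1 = suf.foldl pvStepB d := by
  intro suf
  induction suf with
  | nil =>
    intro d w i h
    rcases h with ⟨hw, _⟩ | ⟨c, t, hst, _⟩
    · simp [hw]
    · exact absurd hst (by simp)
  | cons c t ih =>
    intro d w i h
    rcases h with ⟨hw, hi, hne⟩ | ⟨c₂, t₂, hst, hlast, hw, hi⟩
    · -- left case: w = d ++ c :: t, i = |d|, d.getLast? ≠ some c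
      have hlast := hne c t rfl
      have hd' : pvStepB d c = d ++ [c] := by simp [pvStepB, hlast]
      simp only [List.foldl_cons, hd']
      subst hw hi
      cases t with
      | nil =>
        -- condition false: i+1 = |d|+1 = |w|
        have hcond : ¬ (((d.length : Int) + 1 < (((d ++ [c]).length : Nat) : Int)) ∧
            PySem.List.pyGet? (d ++ [c]) ((d.length : Int) + 1) = some c) := by
          rintro ⟨h1, -⟩
          simp at h1
        simp only [pvStepA, if_neg hcond]
        apply ih
        left
        exact ⟨by simp, by simp, by simp⟩
      | cons c₃ t₃ =>
        have hcast : ((d.length : Int) + 1) = (((d.length + 1 : Nat)) : Int) := by push_cast; ring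
        have hget : PySem.List.pyGet? (d ++ c :: c₃ :: t₃) ((d.length : Int) + 1) = some c₃ := by
          rw [hcast, PySem.List.pyGet?_natCast]
          rw [List.getElem?_append_right (by simp)]
          simp
        by_cases hcc : c₃ = c
        · -- duplicate ahead: A deletes w[i]
          subst hcc
          have hcond : ((d.length : Int) + 1 < (((d ++ c₃ :: c₃ :: t₃).length : Nat) : Int)) ∧
              PySem.List.pyGet? (d ++ c₃ :: c₃ :: t₃) ((d.length : Int) + 1) = some c₃ := by
            refine ⟨by simp, hget⟩
          simp only [pvStepA, if_pos hcond]
          apply ih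
          right
          refine ⟨c₃, t₃, rfl, by simp [List.getLast?_append], ?_, by simp⟩
          rw [PySem.List.slice_to_natCast, hcast, PySem.List.slice_from_natCast]
          simp [List.drop_append]
        · -- no duplicate ahead: i advances
          have hcond : ¬ (((d.length : Int) + 1 < (((d ++ c :: c₃ :: t₃).length : Nat) : Int)) ∧
              PySem.List.pyGet? (d ++ c :: c₃ :: t₃) ((d.length : Int) + 1) = some c) := by
            rintro ⟨-, hg⟩
            rw [hget] at hg
            exact hcc (by injection hg)
          simp only [pvStepA, if_neg hcond]
          apply ih
          left
          refine ⟨by simp, by simp, ?_⟩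
          rintro a s ⟨rfl, rfl⟩
          simp [List.getLast?_append]
          exact fun h => hcc h.symm
    · -- right case: next char equals d's last
      injection hst with h1 h2
      subst h1; subst h2
      have hd' : pvStepB d c = d := by
        simp only [pvStepB, hlast]
        simp
        rintro rfl; simp at hlast
      have hdec : d = d.dropLast ++ [c] := by
        conv_lhs => rw [← List.dropLast_append_getLast? c hlast]
      obtain ⟨k, rfl⟩ : ∃ k, d = k ++ [c] := ⟨d.dropLast, hdec⟩
      have hdl : (k ++ [c]).dropLast = k := by simp
      have hcast : (((k ++ [c]).length : Int) - 1 + 1) = ((k.length + 1 : Nat) : Int) := by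
        push_cast; simp
      simp only [List.foldl_cons, hd']
      subst hw hi
      rw [hdl]
      cases t with
      | nil =>
        have hcond : ¬ (((((k ++ [c]).length : Int) - 1) + 1 < (((k ++ [c]).length : Nat) : Int)) ∧
            PySem.List.pyGet? (k ++ [c]) ((((k ++ [c]).length : Int) - 1) + 1) = some c) := by
          rintro ⟨h1, -⟩
          simp at h1
        simp only [pvStepA, if_neg hcond]
        apply ih
        left
        exact ⟨by simp, by push_cast; simp, by simp⟩
      | cons c₃ t₃ =>
        have hget : PySem.List.pyGet? (k ++ c :: c₃ :: t₃) ((((k ++ [c]).length : Int) - 1) + 1) = some c₃ := by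
          rw [hcast, PySem.List.pyGet?_natCast]
          rw [List.getElem?_append_right (by simp)]
          simp
        by_cases hcc : c₃ = c
        · subst hcc
          have hcond : (((((k ++ [c₃]).length : Int) - 1) + 1 < (((k ++ c₃ :: c₃ :: t₃).length : Nat) : Int)) ∧
              PySem.List.pyGet? (k ++ c₃ :: c₃ :: t₃) ((((k ++ [c₃]).length : Int) - 1) + 1) = some c₃) := by
            refine ⟨?_, hget⟩
            simp
          simp only [pvStepA, if_pos hcond]
          apply ih
          right
          refine ⟨c₃, t₃, rfl, hlast, ?_, rfl⟩
          rw [show ((((k ++ [c₃]).length : Int) - 1)) = ((k.length : Nat) : Int) by push_cast; simp]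
          rw [PySem.List.slice_to_natCast]
          rw [show ((k.length : Nat) : Int) + 1 = ((k.length + 1 : Nat) : Int) by push_cast; ring]
          rw [PySem.List.slice_from_natCast, hdl]
          simp [List.drop_append]
        · have hcond : ¬ (((((k ++ [c]).length : Int) - 1) + 1 < (((k ++ c :: c₃ :: t₃).length : Nat) : Int)) ∧
              PySem.List.pyGet? (k ++ c :: c₃ :: t₃) ((((k ++ [c]).length : Int) - 1) + 1) = some c) := by
            rintro ⟨-, hg⟩
            rw [hget] at hg
            exact hcc (by injection hg)
          simp only [pvStepA, if_neg hcond]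
          apply ih
          left
          refine ⟨by simp, by push_cast; simp, ?_⟩
          rintro a s ⟨rfl, rfl⟩
          rw [hlast]
          intro h
          exact hcc (by injection h with h'; exact h'.symm)

-- ===== VERDICT (by name: the statement is the Claim_ definition above) =====
theorem filter_word_spec : Claim_equal_filter_word := by
  intro word _
  unfold Spec_filter_word filter_word filter_word_alt
  congr 1
  apply pv_inv
  left
  exact ⟨by simp, by simp, by simp⟩
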